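-- pv_equiv track=rewrite | github.com/meyerd851-lab/SWMM_Comparison | core_results.py | parse_row_by_schema
-- ===== SOURCE A (Python) =====
-- from typing import Dict, List, Any, Optional, Tuple
--
-- def parse_row_by_schema(tokens: List[str], columns: List[str], schema: List[str]) -> Dict[str, str]:
--     out: Dict[str, str] = {}
--     i = 0
--     for col, typ in zip(columns, schema):
--         if typ == "time":
--             if i + 1 < len(tokens):
--                 out[col] = f"{tokens[i]} {tokens[i+1]}"
--             elif i < len(tokens):
--                 out[col] = tokens[i]
--             else:
--                 out[col] = ""
--             i += 2
--         else:
--             out[col] = tokens[i] if i < len(tokens) else ""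
--             i += 1
--     return out
-- ===== SOURCE B (Python) =====
-- def parse_row_by_schema(tokens, columns, schema):
--     pairs = list(zip(columns, schema))
--     # offset table: start index of each column, via a running prefix sum of strides
--     strides = [2 if typ == "time" else 1 for _, typ in pairs]
--     starts = []
--     acc = 0
--     for st in strides:
--         starts.append(acc)
--         acc += st
--     n = len(tokens)
--
--     def value(typ, s):
--         if typ == "time":
--             if s + 1 < n:
--                 return tokens[s] + " " + tokens[s + 1]
--             if s < n:
--                 return tokens[s]
--             return ""
--         return tokens[s] if s < n else ""
--
--     out = {}
--     for (col, typ), s in zip(pairs, starts):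
--         out[col] = value(typ, s)
--     return out
-- ===== Notes on version B (the rewrite author's own statement) =====
-- stated objective: alternative
-- what changed: Replaces A's single mutable-cursor scan with a two-pass scheme: first materialize an offset table (prefix sums of per-column strides), then build the dict in an index-driven pass over (column, start) pairs.
import Mathlib
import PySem

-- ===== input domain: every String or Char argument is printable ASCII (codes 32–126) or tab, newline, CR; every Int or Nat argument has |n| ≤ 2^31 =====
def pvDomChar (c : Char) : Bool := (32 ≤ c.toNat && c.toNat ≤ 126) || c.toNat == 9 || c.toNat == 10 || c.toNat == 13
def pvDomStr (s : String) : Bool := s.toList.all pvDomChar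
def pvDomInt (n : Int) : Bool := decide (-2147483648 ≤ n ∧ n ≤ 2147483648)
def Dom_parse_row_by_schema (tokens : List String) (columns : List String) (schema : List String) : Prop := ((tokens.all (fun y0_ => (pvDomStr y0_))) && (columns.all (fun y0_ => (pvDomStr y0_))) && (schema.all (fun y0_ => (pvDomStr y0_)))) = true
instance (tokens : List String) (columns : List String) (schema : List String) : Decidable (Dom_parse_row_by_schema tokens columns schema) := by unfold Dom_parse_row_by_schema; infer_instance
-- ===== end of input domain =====

-- B replaces A's single mutable-cursor scan with an explicit offset table (prefix sums
-- of per-column strides) followed by an index-driven dict-building pass ('alternative').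

-- ===== PORT A =====
-- A: one fold over zip(columns, schema) carrying (dict, cursor i).
def parse_row_by_schema (tokens : List String) (columns : List String) (schema : List String) : List (String × String) :=
  let n : Int := tokens.length
  ((List.zip columns schema).foldl
    (fun (st : PySem.Dict String String × Int) ct =>
      let out := st.1
      let i := st.2
      let col := ct.1
      let typ := ct.2
      if typ = "time" then
        if i + 1 < n then
          (out.insert col ((PySem.List.pyGet? tokens i).getD "" ++ " " ++ (PySem.List.pyGet? tokens (i+1)).getD ""), i + 2)
        else if i < n then
          (out.insert col ((PySem.List.pyGet? tokens i).getD ""), i + 2)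
        else
          (out.insert col "", i + 2)
      else
        (out.insert col (if i < n then (PySem.List.pyGet? tokens i).getD "" else ""), i + 1))
    (PySem.Dict.empty, 0)).1.items

-- ===== PORT B =====
-- B helpers: stride per type, offset table by running prefix sum, per-column value.
def pvStride (typ : String) : Int := if typ = "time" then 2 else 1

-- starts.append(acc); acc += st  — running prefix sum over the strides list
def pvStarts : List Int → Int → List Int
  | [], _ => []
  | st :: rest, acc => acc :: pvStarts rest (acc + st)

def pvValue (tokens : List String) (n : Int) (typ : String) (s : Int) : String :=
  if typ = "time" then
    if s + 1 < n then (PySem.List.pyGet? tokens s).getD "" ++ " " ++ (PySem.List.pyGet? tokens (s+1)).getD ""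
    else if s < n then (PySem.List.pyGet? tokens s).getD ""
    else ""
  else
    if s < n then (PySem.List.pyGet? tokens s).getD "" else ""

def parse_row_by_schema_alt (tokens : List String) (columns : List String) (schema : List String) : List (String × String) :=
  let pairs := List.zip columns schema
  let strides := pairs.map (fun ct => pvStride ct.2)
  let starts := pvStarts strides 0
  let n : Int := tokens.length
  ((List.zip pairs starts).foldl
    (fun (out : PySem.Dict String String) p =>
      out.insert p.1.1 (pvValue tokens n p.1.2 p.2))
    PySem.Dict.empty).items

-- ===== PRECONDITION & SPEC =====
def Spec_parse_row_by_schema (tokens : List String) (columns : List String) (schema : List String) (out : List (String × String)) : Prop := out = parse_row_by_schema_alt tokens columns schema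
instance (tokens : List String) (columns : List String) (schema : List String) (out : List (String × String)) : Decidable (Spec_parse_row_by_schema tokens columns schema out) := by unfold Spec_parse_row_by_schema; infer_instance

-- ===== CLAIM (what is proved, stated in full; the proofs are below) =====
def Claim_equal_parse_row_by_schema : Prop := ∀ (tokens : List String) (columns : List String) (schema : List String), Dom_parse_row_by_schema tokens columns schema → Spec_parse_row_by_schema tokens columns schema (parse_row_by_schema tokens columns schema)

-- ===== LEMMAS AND PROOFS =====

-- The two folds agree from any dict d and cursor i.
theorem pv_fold_agree (tokens : List String) (pairs : List (String × String))
    (d : PySem.Dict String String) (i : Int) :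
    (pairs.foldl
      (fun (st : PySem.Dict String String × Int) ct =>
        let out := st.1
        let j := st.2
        let col := ct.1
        let typ := ct.2
        if typ = "time" then
          if j + 1 < (tokens.length : Int) then
            (out.insert col ((PySem.List.pyGet? tokens j).getD "" ++ " " ++ (PySem.List.pyGet? tokens (j+1)).getD ""), j + 2)
          else if j < (tokens.length : Int) then
            (out.insert col ((PySem.List.pyGet? tokens j).getD ""), j + 2)
          else
            (out.insert col "", j + 2)
        else
          (out.insert col (if j < (tokens.length : Int) then (PySem.List.pyGet? tokens j).getD "" else ""), j + 1))
      (d, i)).1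
    =
    (List.zip pairs (pvStarts (pairs.map (fun ct => pvStride ct.2)) i)).foldl
      (fun (out : PySem.Dict String String) p =>
        out.insert p.1.1 (pvValue tokens tokens.length p.1.2 p.2)) d := by
  induction pairs generalizing d i with
  | nil => simp [pvStarts]
  | cons hd tl ih =>
    obtain ⟨col, typ⟩ := hd
    by_cases ht : typ = "time"
    · subst ht
      simp only [List.map_cons, pvStarts, List.zip_cons_cons, List.foldl_cons, pvStride,
        pvValue]
      by_cases h1 : i + 1 < (tokens.length : Int)
      · simp only [if_pos h1]
        exact ih _ _
      · simp only [if_neg h1]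
        by_cases h2 : i < (tokens.length : Int)
        · simp only [if_pos h2]; exact ih _ _
        · simp only [if_neg h2]; exact ih _ _
    · simp only [List.map_cons, pvStarts, List.zip_cons_cons, List.foldl_cons, pvStride,
        pvValue, if_neg ht]
      exact ih _ _

-- ===== VERDICT (by name: the statement is the Claim_ definition above) =====
theorem parse_row_by_schema_spec : Claim_equal_parse_row_by_schema := by
  intro tokens columns schema _
  show _ = _
  unfold parse_row_by_schema parse_row_by_schema_alt
  simp only []
  rw [pv_fold_agree]
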